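-- pv_equiv track=rewrite | github.com/LaMemeBete/TP-INFORMATIQUE | tp-4.py | existe_couples_divise_rapide
-- ===== SOURCE A (Python) =====
-- def existe_couples_divise_rapide(n, p):
--     indexSum = 0;
--     indexInt = n
--     foundCouple = False;
--     while indexInt < p:
--         currentPlace = indexInt+1
--         while currentPlace <= p:
--             indexSum +=1;
--             if(indexInt != 0):
--                 if(currentPlace%indexInt == 0):
--                     return True;
--             currentPlace += 1;
--         indexInt += 1
--     return False
-- ===== SOURCE B (Python) =====
-- def existe_couples_divise_rapide(n, p):
--     # O(1): a negative a always divides 0, so n<0<=p suffices;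
--     # otherwise the smallest eligible a is max(n,1) and its smallest
--     # proper multiple above it is 2a, which must fit under p.
--     if n < 0 and p >= 0:
--         return True
--     a = n if n > 1 else 1
--     return 2 * a <= p
-- ===== Notes on version B (the rewrite author's own statement) =====
-- stated objective: faster
-- what changed: Replaced the O((p-n)^2) nested scan for a dividing pair with an O(1) closed-form test: any negative a divides 0 (so n<0 and p>=0 suffices), otherwise the smallest eligible divisor a=max(n,1) works iff its double 2a fits under p.
import Mathlib
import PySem

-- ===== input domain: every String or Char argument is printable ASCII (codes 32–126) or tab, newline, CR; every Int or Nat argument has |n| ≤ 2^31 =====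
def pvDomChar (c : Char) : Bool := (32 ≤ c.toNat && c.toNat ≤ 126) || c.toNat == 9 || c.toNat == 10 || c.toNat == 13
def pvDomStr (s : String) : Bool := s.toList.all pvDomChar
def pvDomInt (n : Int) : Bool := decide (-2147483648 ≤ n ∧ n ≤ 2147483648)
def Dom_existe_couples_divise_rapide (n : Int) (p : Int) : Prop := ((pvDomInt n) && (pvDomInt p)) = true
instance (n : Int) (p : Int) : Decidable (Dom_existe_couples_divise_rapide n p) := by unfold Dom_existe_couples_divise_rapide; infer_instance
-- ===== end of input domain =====

-- B replaces A's O((p-n)^2) nested scan by an O(1) closed-form test (smallest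
-- eligible divisor a = max(n,1) must have 2a ≤ p; any negative a divides 0).

-- ===== PORT A =====
-- inner 'while currentPlace <= p' loop; fuel = remaining iterations, exact at the
-- call site ((p - indexInt).toNat), so recursion is structural (indexSum is dead state)
def pvInnerA (indexInt p : Int) : Nat → Int → Bool
  | 0, _ => false
  | fuel + 1, currentPlace =>
    if currentPlace ≤ p then
      if indexInt ≠ 0 then
        if PySem.Int.mod currentPlace indexInt = 0 then true
        else pvInnerA indexInt p fuel (currentPlace + 1)
      else pvInnerA indexInt p fuel (currentPlace + 1)
    else false

-- outer 'while indexInt < p' loop; fuel = (p - indexInt).toNat at the call site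
def pvOuterA (p : Int) : Nat → Int → Bool
  | 0, _ => false
  | fuel + 1, indexInt =>
    if indexInt < p then
      if pvInnerA indexInt p (p - indexInt).toNat (indexInt + 1) then true
      else pvOuterA p fuel (indexInt + 1)
    else false

def existe_couples_divise_rapide (n : Int) (p : Int) : Bool :=
  pvOuterA p (p - n).toNat n

-- ===== PORT B =====
def existe_couples_divise_rapide_alt (n : Int) (p : Int) : Bool :=
  if n < 0 ∧ 0 ≤ p then true
  else
    let a := if n > 1 then n else 1
    decide (2 * a ≤ p)

-- ===== PRECONDITION & SPEC =====
def Spec_existe_couples_divise_rapide (n : Int) (p : Int) (out : Bool) : Prop := out = existe_couples_divise_rapide_alt n p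
instance (n : Int) (p : Int) (out : Bool) : Decidable (Spec_existe_couples_divise_rapide n p out) := by unfold Spec_existe_couples_divise_rapide; infer_instance

-- ===== CLAIM (what is proved, stated in full; the proofs are below) =====
def Claim_equal_existe_couples_divise_rapide : Prop := ∀ (n : Int) (p : Int), Dom_existe_couples_divise_rapide n p → Spec_existe_couples_divise_rapide n p (existe_couples_divise_rapide n p)

-- ===== LEMMAS AND PROOFS =====

theorem pvInnerA_iff (a p : Int) (fuel : Nat) (b : Int) (hf : (p + 1 - b).toNat ≤ fuel) :
    pvInnerA a p fuel b = true ↔ ∃ k, b ≤ k ∧ k ≤ p ∧ a ≠ 0 ∧ a ∣ k := by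
  induction fuel generalizing b with
  | zero =>
    simp only [pvInnerA, Bool.false_eq_true, false_iff]
    rintro ⟨k, hk1, hk2, _, _⟩; omega
  | succ fuel ih =>
    by_cases hle : b ≤ p
    · have hstep := ih (b + 1) (by omega)
      by_cases hne : a ≠ 0
      · by_cases hmod : PySem.Int.mod b a = 0
        · simp only [pvInnerA, if_pos hle, if_pos hne, if_pos hmod, true_iff]
          exact ⟨b, le_refl b, hle, hne, (PySem.Int.mod_eq_zero_iff_dvd b a).mp hmod⟩
        · simp only [pvInnerA, if_pos hle, if_pos hne, if_neg hmod]
          rw [hstep]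
          constructor
          · rintro ⟨k, hk1, hk2, hk3, hk4⟩; exact ⟨k, by omega, hk2, hk3, hk4⟩
          · rintro ⟨k, hk1, hk2, hk3, hk4⟩
            refine ⟨k, ?_, hk2, hk3, hk4⟩
            rcases eq_or_lt_of_le hk1 with h | h
            · exact absurd ((PySem.Int.mod_eq_zero_iff_dvd b a).mpr (h ▸ hk4)) hmod
            · omega
      · simp only [pvInnerA, if_pos hle, if_neg hne]
        rw [hstep]
        constructor
        · rintro ⟨k, hk1, hk2, hk3, hk4⟩; exact ⟨k, by omega, hk2, hk3, hk4⟩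
        · rintro ⟨k, _, _, hk3, _⟩; exact absurd hk3 hne
    · simp only [pvInnerA, if_neg hle, Bool.false_eq_true, false_iff]
      rintro ⟨k, hk1, hk2, _, _⟩; omega

theorem pvOuterA_iff (p : Int) (fuel : Nat) (a0 : Int) (hf : (p - a0).toNat ≤ fuel) :
    pvOuterA p fuel a0 = true ↔ ∃ a, a0 ≤ a ∧ a < p ∧ ∃ k, a < k ∧ k ≤ p ∧ a ≠ 0 ∧ a ∣ k := by
  induction fuel generalizing a0 with
  | zero =>
    simp only [pvOuterA, Bool.false_eq_true, false_iff]
    rintro ⟨a, ha1, ha2, _⟩; omega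
  | succ fuel ih =>
    by_cases hlt : a0 < p
    · have hinner := pvInnerA_iff a0 p (p - a0).toNat (a0 + 1) (by omega)
      have hstep := ih (a0 + 1) (by omega)
      by_cases hin : pvInnerA a0 p (p - a0).toNat (a0 + 1) = true
      · simp only [pvOuterA, if_pos hlt, if_pos hin, true_iff]
        rcases hinner.mp hin with ⟨k, hk1, hk2, hk3, hk4⟩
        exact ⟨a0, le_refl a0, hlt, k, by omega, hk2, hk3, hk4⟩
      · simp only [pvOuterA, if_pos hlt, if_neg hin]
        rw [hstep]
        constructor
        · rintro ⟨a, ha1, ha2, hrest⟩; exact ⟨a, by omega, ha2, hrest⟩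
        · rintro ⟨a, ha1, ha2, k, hk1, hk2, hk3, hk4⟩
          rcases eq_or_lt_of_le ha1 with h | h
          · subst h
            exact absurd (hinner.mpr ⟨k, by omega, hk2, hk3, hk4⟩) hin
          · exact ⟨a, by omega, ha2, k, hk1, hk2, hk3, hk4⟩
    · simp only [pvOuterA, if_neg hlt, Bool.false_eq_true, false_iff]
      rintro ⟨a, ha1, ha2, _⟩; omega

-- if a < k ≤ p < 0 then a cannot divide k
theorem no_neg_multiple {a k p : Int} (h1 : a < k) (h2 : k ≤ p) (hp : p < 0) (hd : a ∣ k) : False := by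
  rcases hd with ⟨m, rfl⟩
  have ha : a < 0 := by nlinarith
  have hm0 : 0 < m := by nlinarith
  have hm1 : m < 1 := by nlinarith
  omega

-- if 0 < a and a ∣ k and a < k then 2 * a ≤ k
theorem two_mul_le_of_dvd {a k : Int} (ha : 0 < a) (h1 : a < k) (hd : a ∣ k) : 2 * a ≤ k := by
  rcases hd with ⟨m, rfl⟩
  have : 1 < m := by nlinarith
  nlinarith

-- ===== VERDICT (by name: the statement is the Claim_ definition above) =====
theorem existe_couples_divise_rapide_spec : Claim_equal_existe_couples_divise_rapide := by
  intro n p _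
  unfold Spec_existe_couples_divise_rapide existe_couples_divise_rapide existe_couples_divise_rapide_alt
  by_cases hnp : n < 0 ∧ 0 ≤ p
  · simp only [if_pos hnp]
    exact (pvOuterA_iff p (p - n).toNat n (le_refl _)).mpr ⟨-1, by omega, by omega, 0, by omega, by omega, by omega, ⟨0, by ring⟩⟩
  · simp only [hnp, if_false]
    set a0 : Int := if n > 1 then n else 1 with ha0
    have ha0pos : 0 < a0 := by rw [ha0]; split <;> omega
    have ha0n : n ≤ a0 := by rw [ha0]; split <;> omega
    by_cases hle : 2 * a0 ≤ p
    · simp only [hle, decide_true]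
      exact (pvOuterA_iff p (p - n).toNat n (le_refl _)).mpr
        ⟨a0, ha0n, by omega, 2 * a0, by omega, hle, by omega, ⟨2, by ring⟩⟩
    · simp only [hle, decide_false]
      rw [← Bool.not_eq_true, pvOuterA_iff p (p - n).toNat n (le_refl _)]
      rintro ⟨a, ha1, ha2, k, hk1, hk2, hk3, hk4⟩
      rcases lt_trichotomy a 0 with hneg | hz | hpos
      · -- a negative forces n < 0; as ¬(n<0 ∧ 0≤p), p < 0, impossible
        have hp : p < 0 := by
          rcases not_and_or.mp hnp with h | h
          · omega
          · omega
        exact no_neg_multiple hk1 hk2 hp hk4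
      · exact hk3 hz
      · have haa0 : a0 ≤ a := by rw [ha0]; split <;> omega
        have := two_mul_le_of_dvd hpos hk1 hk4
        omega
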